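-- pv_equiv track=rewrite | github.com/lioalexandre-procurementor/easytech-wiki-fr | scripts/gen_generals_from_game.py | derive_category
-- ===== SOURCE A (Python) =====
-- def derive_category(stats_max: dict) -> str:
--     keys = ("infantry", "armor", "artillery", "navy", "airforce")
--     pairs = [(k, stats_max.get(k, 0)) for k in keys]
--     top = max(p[1] for p in pairs)
--     if top == 0:
--         return "balanced"
--     leaders = [k for k, v in pairs if v == top]
--     if len(leaders) > 1:
--         return "balanced"
--     mapping = {
--         "infantry": "infantry",
--         "armor": "tank",
--         "artillery": "artillery",
--         "navy": "navy",
--         "airforce": "airforce",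
--     }
--     return mapping[leaders[0]]
-- ===== SOURCE B (Python) =====
-- def derive_category(stats_max: dict) -> str:
--     keys = ("infantry", "armor", "artillery", "navy", "airforce")
--     best_key = keys[0]
--     best_val = stats_max.get(best_key, 0)
--     tie = False
--     for k in keys[1:]:
--         v = stats_max.get(k, 0)
--         if v > best_val:
--             best_val, best_key, tie = v, k, False
--         elif v == best_val:
--             tie = True
--     if best_val == 0 or tie:
--         return "balanced"
--     return "tank" if best_key == "armor" else best_key
-- ===== Notes on version B (the rewrite author's own statement) =====
-- stated objective: simpler
-- what changed: A builds a pair list, takes the max in a second pass and filters the leaders in a third; B does one scan over the fixed key tuple maintaining best value, best key and a tie flag.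
import Mathlib
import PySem

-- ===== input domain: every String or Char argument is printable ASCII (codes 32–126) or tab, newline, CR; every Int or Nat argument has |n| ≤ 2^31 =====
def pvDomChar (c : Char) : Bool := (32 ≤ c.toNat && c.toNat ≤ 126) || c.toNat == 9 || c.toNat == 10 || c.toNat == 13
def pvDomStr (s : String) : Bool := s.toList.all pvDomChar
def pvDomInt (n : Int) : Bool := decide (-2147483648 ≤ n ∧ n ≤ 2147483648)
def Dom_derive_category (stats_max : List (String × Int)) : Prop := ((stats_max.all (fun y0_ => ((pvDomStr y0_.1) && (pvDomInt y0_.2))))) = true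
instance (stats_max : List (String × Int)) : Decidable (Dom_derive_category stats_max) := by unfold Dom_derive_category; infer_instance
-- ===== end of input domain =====

-- B replaces A's three passes (pair list, max, leader filter) with one scan keeping best value, best key and a tie flag; objective: simpler.

-- ===== PORT A =====
def derive_category (stats_max : List (String × Int)) : String :=
  let keys : List String := ["infantry", "armor", "artillery", "navy", "airforce"]
  let pairs := keys.map (fun k => (k, PySem.Dict.getD (PySem.Dict.mk stats_max) k 0))
  -- Python `max(...)` over a nonempty sequence: fold max over the tail starting from the head
  let top := match pairs.map Prod.snd with
    | [] => 0   -- unreachable: `pairs` has five elements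
    | v :: vs => vs.foldl max v
  if top == 0 then "balanced"
  else
    let leaders := (pairs.filter (fun p => p.2 == top)).map Prod.fst
    if leaders.length > 1 then "balanced"
    else
      let mapping : PySem.Dict String String := PySem.Dict.mk
        [("infantry", "infantry"), ("armor", "tank"), ("artillery", "artillery"),
         ("navy", "navy"), ("airforce", "airforce")]
      match PySem.List.pyGet? leaders 0 with
      | some k => (PySem.Dict.get? mapping k).getD ""   -- KeyError impossible: leaders ⊆ keys
      | none => ""   -- unreachable: `leaders` is nonempty here

-- ===== PORT B =====
def derive_category_alt (stats_max : List (String × Int)) : String :=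
  let st := ["armor", "artillery", "navy", "airforce"].foldl
    (fun st k =>
      if PySem.Dict.getD (PySem.Dict.mk stats_max) k 0 > st.1 then
        (PySem.Dict.getD (PySem.Dict.mk stats_max) k 0, k, false)
      else if PySem.Dict.getD (PySem.Dict.mk stats_max) k 0 == st.1 then (st.1, st.2.1, true)
      else st)
    (PySem.Dict.getD (PySem.Dict.mk stats_max) "infantry" 0, "infantry", false)
  if st.1 == 0 || st.2.2 then "balanced"
  else if st.2.1 == "armor" then "tank" else st.2.1

-- ===== PRECONDITION & SPEC =====
def Spec_derive_category (stats_max : List (String × Int)) (out : String) : Prop := out = derive_category_alt stats_max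
instance (stats_max : List (String × Int)) (out : String) : Decidable (Spec_derive_category stats_max out) := by unfold Spec_derive_category; infer_instance

-- ===== CLAIM (what is proved, stated in full; the proofs are below) =====
def Claim_equal_derive_category : Prop := ∀ (stats_max : List (String × Int)), Dom_derive_category stats_max → Spec_derive_category stats_max (derive_category stats_max)

-- ===== LEMMAS AND PROOFS =====

def pvFirstKey : List (String × Int) → Int → String
  | [], _ => ""
  | (k, v) :: r, m => if v = m then k else pvFirstKey r m

lemma pv_le_foldl_max (l : List Int) (a : Int) : a ≤ l.foldl max a := by
  induction l generalizing a with
  | nil => simp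
  | cons x xs ih => exact le_trans (le_max_left a x) (ih (max a x))

lemma pv_loop_inv (d : PySem.Dict String Int) (l : List String) (v0 : Int) (k0 : String) (t0 : Bool) :
    l.foldl
      (fun st k =>
        if PySem.Dict.getD d k 0 > st.1 then (PySem.Dict.getD d k 0, k, false)
        else if PySem.Dict.getD d k 0 == st.1 then (st.1, st.2.1, true)
        else st)
      (v0, k0, t0)
    = ((l.map (fun k => PySem.Dict.getD d k 0)).foldl max v0,
       pvFirstKey ((k0, v0) :: l.map (fun k => (k, PySem.Dict.getD d k 0)))
         ((l.map (fun k => PySem.Dict.getD d k 0)).foldl max v0),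
       decide (2 ≤ (v0 :: l.map (fun k => PySem.Dict.getD d k 0)).count
           ((l.map (fun k => PySem.Dict.getD d k 0)).foldl max v0))
         || (t0 && decide (v0 = (l.map (fun k => PySem.Dict.getD d k 0)).foldl max v0))) := by
  induction l generalizing v0 k0 t0 with
  | nil => simp [pvFirstKey]
  | cons k ks ih =>
    simp only [List.foldl_cons, List.map_cons]
    rcases lt_trichotomy v0 (PySem.Dict.getD d k 0) with hgt | heq | hlt
    · -- strict new max
      rw [show (if PySem.Dict.getD d k 0 > v0 then (PySem.Dict.getD d k 0, k, false)
        else if PySem.Dict.getD d k 0 == v0 then (v0, k0, true)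
        else (v0, k0, t0)) = (PySem.Dict.getD d k 0, k, false) by
          simp [hgt]]
      rw [ih]
      have hmax : max v0 (PySem.Dict.getD d k 0) = PySem.Dict.getD d k 0 := max_eq_right hgt.le
      have hle := pv_le_foldl_max (ks.map (fun k => PySem.Dict.getD d k 0)) (PySem.Dict.getD d k 0)
      have hne : v0 ≠ (ks.map (fun k => PySem.Dict.getD d k 0)).foldl max (PySem.Dict.getD d k 0) := by
        intro h; omega
      simp only [hmax, Prod.mk.injEq]
      refine ⟨by trivial, ?_, ?_⟩
      · simp [pvFirstKey, hne]
      · simp [List.count_cons, hne]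
    · -- equal: tie
      rw [show (if PySem.Dict.getD d k 0 > v0 then (PySem.Dict.getD d k 0, k, false)
        else if PySem.Dict.getD d k 0 == v0 then (v0, k0, true)
        else (v0, k0, t0)) = (v0, k0, true) by
          simp [← heq]]
      rw [ih]
      have hmax : max v0 (PySem.Dict.getD d k 0) = v0 := by omega
      simp only [hmax, Prod.mk.injEq]
      by_cases hvM : v0 = (ks.map (fun k => PySem.Dict.getD d k 0)).foldl max v0
      · have h2 : PySem.Dict.getD d k 0 = (ks.map (fun k => PySem.Dict.getD d k 0)).foldl max v0 := by
          omega
        refine ⟨by trivial, ?_, ?_⟩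
        · rw [← hvM]; simp [pvFirstKey]
        · rw [← hvM, show PySem.Dict.getD d k 0 = v0 from heq.symm]
          simp
      · have h2 : ¬ PySem.Dict.getD d k 0 = (ks.map (fun k => PySem.Dict.getD d k 0)).foldl max v0 := by
          omega
        refine ⟨by trivial, ?_, ?_⟩
        · simp only [pvFirstKey]
          simp [hvM, h2]
        · simp [hvM, h2]
    · -- smaller: unchanged
      have h1 : ¬ (PySem.Dict.getD d k 0 > v0) := by omega
      have h2 : ¬ ((PySem.Dict.getD d k 0 == v0) = true) := by simp; omega
      rw [show (if PySem.Dict.getD d k 0 > v0 then (PySem.Dict.getD d k 0, k, false)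
        else if PySem.Dict.getD d k 0 == v0 then (v0, k0, true)
        else (v0, k0, t0)) = (v0, k0, t0) by rw [if_neg h1, if_neg h2]]
      rw [ih]
      have hmax : max v0 (PySem.Dict.getD d k 0) = v0 := max_eq_left hlt.le
      have hle := pv_le_foldl_max (ks.map (fun k => PySem.Dict.getD d k 0)) v0
      have hne : ¬ PySem.Dict.getD d k 0 = (ks.map (fun k => PySem.Dict.getD d k 0)).foldl max v0 := by
        intro h; omega
      simp only [hmax, Prod.mk.injEq]
      refine ⟨by trivial, ?_, ?_⟩
      · simp only [pvFirstKey]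
        by_cases hv0M : v0 = (ks.map (fun k => PySem.Dict.getD d k 0)).foldl max v0
        · rw [← hv0M]; simp
        · simp [hv0M, hne]
      · simp [List.count_cons, hne]

set_option maxHeartbeats 4000000 in
lemma pv_core (a b c d e t : Int)
    (hch : t = a ∨ t = b ∨ t = c ∨ t = d ∨ t = e) :
    (if (t == 0) = true then "balanced"
      else
        if (List.map Prod.fst
              (List.filter (fun p => p.2 == t)
                [("infantry", a), ("armor", b), ("artillery", c), ("navy", d), ("airforce", e)])).length > 1 then
          "balanced"
        else
          match PySem.List.pyGet?
              (List.map Prod.fst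
                (List.filter (fun p => p.2 == t)
                  [("infantry", a), ("armor", b), ("artillery", c), ("navy", d), ("airforce", e)])) 0 with
          | some k => ((PySem.Dict.mk [("infantry", "infantry"), ("armor", "tank"),
              ("artillery", "artillery"), ("navy", "navy"), ("airforce", "airforce")]).get? k).getD ""
          | none => "")
    = (if (t == 0 || (decide (2 ≤ List.count t [a, b, c, d, e]) || false && decide (a = t))) = true then
        "balanced"
      else
        if (pvFirstKey [("infantry", a), ("armor", b), ("artillery", c), ("navy", d), ("airforce", e)] t
              == "armor") = true then "tank"
        else pvFirstKey [("infantry", a), ("armor", b), ("artillery", c), ("navy", d), ("airforce", e)] t) := by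
  by_cases h1 : a = t <;> by_cases h2 : b = t <;> by_cases h3 : c = t <;> by_cases h4 : d = t <;>
    by_cases h5 : e = t
  all_goals try (exfalso; rcases hch with h | h | h | h | h <;> omega)
  all_goals try simp_all [pvFirstKey, List.count_cons, List.filter, PySem.List.pyGet?,
    PySem.List.pyIdx?, PySem.Dict.get?]
  all_goals try (intro _)
  all_goals try (repeat' split)
  all_goals try subst_vars
  all_goals try simp_all [pvFirstKey, List.filter, PySem.List.pyGet?, PySem.List.pyIdx?,
    PySem.Dict.get?, List.find?]
  all_goals try subst_vars
  all_goals simp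

set_option maxHeartbeats 1000000 in
theorem pv_eq (s : List (String × Int)) : derive_category s = derive_category_alt s := by
  simp only [derive_category, derive_category_alt]
  rw [pv_loop_inv]
  simp only [List.map_cons, List.map_nil, List.foldl_cons, List.foldl_nil]
  refine pv_core _ _ _ _ _ _ ?_
  rcases max_choice (max (max (max (PySem.Dict.getD (PySem.Dict.mk s) "infantry" 0)
      (PySem.Dict.getD (PySem.Dict.mk s) "armor" 0)) (PySem.Dict.getD (PySem.Dict.mk s) "artillery" 0))
      (PySem.Dict.getD (PySem.Dict.mk s) "navy" 0)) (PySem.Dict.getD (PySem.Dict.mk s) "airforce" 0) with h | h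
  · rw [h]
    rcases max_choice (max (max (PySem.Dict.getD (PySem.Dict.mk s) "infantry" 0)
        (PySem.Dict.getD (PySem.Dict.mk s) "armor" 0)) (PySem.Dict.getD (PySem.Dict.mk s) "artillery" 0))
        (PySem.Dict.getD (PySem.Dict.mk s) "navy" 0) with h | h
    · rw [h]
      rcases max_choice (max (PySem.Dict.getD (PySem.Dict.mk s) "infantry" 0)
          (PySem.Dict.getD (PySem.Dict.mk s) "armor" 0)) (PySem.Dict.getD (PySem.Dict.mk s) "artillery" 0) with h | h
      · rw [h]
        rcases max_choice (PySem.Dict.getD (PySem.Dict.mk s) "infantry" 0)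
            (PySem.Dict.getD (PySem.Dict.mk s) "armor" 0) with h | h <;> rw [h] <;> tauto
      · tauto
    · tauto
  · tauto

-- ===== VERDICT (by name: the statement is the Claim_ definition above) =====
theorem derive_category_spec : Claim_equal_derive_category := by
  intro s _
  unfold Spec_derive_category
  exact pv_eq s
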